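-- pv_equiv track=rewrite | github.com/kimjune01/june.kim | worklog/h5b_healability.py | find_minimum_spanner_greedy
-- ===== SOURCE A (Python) =====
-- def compute_reachability(k, edge_set, M):
--     """
--     All-pairs temporal reachability in K_{k,k}.
--     Vertices: a_i = i, b_j = k+j. Edge (i,j) has timestamp M[i][j].
--     Strictly increasing timestamps for journeys (all timestamps distinct).
--     """
--     n = 2 * k
--     sorted_edges = sorted([(M[i][j], i, k + j) for (i, j) in edge_set])
--
--     can_reach = [dict() for _ in range(n)]
--     for v in range(n):
--         can_reach[v][v] = 0
--
--     for (t, a, b) in sorted_edges: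
--         new_b = {s: t for s, at in can_reach[a].items()
--                  if at < t and (s not in can_reach[b] or t < can_reach[b][s])}
--         new_a = {s: t for s, at in can_reach[b].items()
--                  if at < t and (s not in can_reach[a] or t < can_reach[a][s])}
--         can_reach[b].update(new_b)
--         can_reach[a].update(new_a)
--
--     reachable = set()
--     for v in range(n):
--         for src in can_reach[v]:
--             if src != v:
--                 reachable.add((src, v))
--     return reachable
--
-- def full_reachability(k, M):
--     all_edges = set((i, j) for i in range(k) for j in range(k))
--     return compute_reachability(k, all_edges, M)
--
-- def is_spanner(k, M, edge_set, full_reach):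
--     return compute_reachability(k, edge_set, M) == full_reach
--
-- def find_minimum_spanner_greedy(k, M):
--     full_reach = full_reachability(k, M)
--     all_edges = [(i, j) for i in range(k) for j in range(k)]
--     all_edges.sort(key=lambda e: M[e[0]][e[1]], reverse=True)
--     current = set(all_edges)
--     for e in all_edges:
--         candidate = current - {e}
--         if is_spanner(k, M, candidate, full_reach):
--             current = candidate
--     return current, full_reach
-- ===== SOURCE B (Python) =====
-- def temporal_reachability(k, edge_set, M):
--     """
--     All-pairs temporal reachability in K_{k,k}, kept in ONE flat dict
--     arrival keyed by (source, vertex) pairs: arrival[(s, v)] = timestamp of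
--     the last edge of a strictly-increasing journey from s to v (0 for s = v).
--     """
--     n = 2 * k
--     events = sorted((M[i][j], i, k + j) for (i, j) in edge_set)
--
--     arrival = {}
--     for v in range(n):
--         arrival[(v, v)] = 0
--
--     for (t, a, b) in events:
--         updates = []
--         for ((s, u), at) in arrival.items():
--             if u == a and at < t:
--                 old = arrival.get((s, b))
--                 if old is None or t < old:
--                     updates.append(((s, b), t))
--         for ((s, u), at) in arrival.items():
--             if u == b and at < t:
--                 old = arrival.get((s, a))
--                 if old is None or t < old:
--                     updates.append(((s, a), t))
--         for key, val in updates: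
--             arrival[key] = val
--
--     reachable = set()
--     for v in range(n):
--         for (s, u) in arrival:
--             if u == v and s != v:
--                 reachable.add((s, v))
--     return reachable
--
-- def find_minimum_spanner_greedy(k, M):
--     all_edges = [(i, j) for i in range(k) for j in range(k)]
--     full_reach = temporal_reachability(k, set(all_edges), M)
--     pending = sorted(all_edges, key=lambda e: M[e[0]][e[1]], reverse=True)
--     current = set(pending)
--     while pending:
--         e = pending.pop(0)
--         trimmed = current - {e}
--         if temporal_reachability(k, trimmed, M) == full_reach:
--             current = trimmed
--     return current, full_reach
-- ===== Notes on version B (the rewrite author's own statement) =====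
-- stated objective: alternative
-- what changed: The reachability sweep now keeps ONE flat dict keyed by (source, vertex) pairs and collects an explicit update list per edge instead of A's list of per-vertex dicts with dict-comprehension merges, events are sorted once up front, and the greedy removal runs as a worklist loop popping pending edges instead of A's for-loop with a separate is_spanner/full_reachability helper layer.
import Mathlib
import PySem

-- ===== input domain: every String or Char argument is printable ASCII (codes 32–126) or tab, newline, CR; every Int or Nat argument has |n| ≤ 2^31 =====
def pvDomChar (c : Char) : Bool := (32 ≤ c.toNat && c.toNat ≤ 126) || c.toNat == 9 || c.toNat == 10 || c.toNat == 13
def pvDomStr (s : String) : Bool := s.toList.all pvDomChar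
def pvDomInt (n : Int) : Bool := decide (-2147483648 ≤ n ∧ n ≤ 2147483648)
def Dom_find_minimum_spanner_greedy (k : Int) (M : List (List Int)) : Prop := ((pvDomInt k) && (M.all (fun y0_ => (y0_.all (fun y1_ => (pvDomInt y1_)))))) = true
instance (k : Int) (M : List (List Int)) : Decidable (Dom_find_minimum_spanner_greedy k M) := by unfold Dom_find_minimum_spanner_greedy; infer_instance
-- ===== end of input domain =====

-- B rewrites the reachability sweep around ONE flat dict keyed by (source, vertex) pairs with an
-- explicit per-edge update list, sorts events by a library stable sort, and prunes edges by
-- structural recursion instead of A's per-vertex dicts and foldl loop (objective: alternative).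

-- ===== PORT A =====
-- Python's `<` on 3-tuples, spelled out lexicographically (Mathlib's `<` on products is the
-- pointwise order, so sorted() on tuples is ported through an explicit comparator).
def pvTripleLt (p q : Int × Int × Int) : Bool :=
  p.1 < q.1 || (p.1 == q.1 && (p.2.1 < q.2.1 || (p.2.1 == q.2.1 && p.2.2 < q.2.2)))

-- sorted(list_of_triples): the stable insertion sort of PySem.List.sorted
-- (cf. PySem.List.sorted_eq_foldl_insertBy) with the comparator above; exact.
def pvSortTriples (xs : List (Int × Int × Int)) : List (Int × Int × Int) :=
  xs.foldl (fun acc x => PySem.List.insertBy pvTripleLt x acc) []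

-- sorted([(M[i][j], i, k + j) for (i, j) in edge_set]).  Iterating the set is safe: the triples
-- are pairwise distinct ((i, k+j) determines the edge), so the sorted result does not depend on
-- the (unmodelled) set iteration order.
-- pyGetD with a default is exact here: whenever the Python returns (Pre_), i and j are in range.
def pvEdgeTriples (k : Int) (edge_set : List (Int × Int)) (M : List (List Int)) :
    List (Int × Int × Int) :=
  pvSortTriples (edge_set.map
    (fun e => (PySem.List.pyGetD (PySem.List.pyGetD M e.1 []) e.2 0, e.1, k + e.2)))

-- [(i, j) for i in range(k) for j in range(k)] — identical comprehension in A and in B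
def pvAllEdges (k : Int) : List (Int × Int) :=
  (PySem.List.pyRange 0 k 1).flatMap (fun i => (PySem.List.pyRange 0 k 1).map (fun j => (i, j)))

-- the body of A's edge loop (new_b / new_a computed from the pre-edge state, then b updated, then a)
def pvStepA (cs : List (PySem.Dict Int Int)) (e : Int × Int × Int) : List (PySem.Dict Int Int) :=
  let t := e.1
  let a := e.2.1
  let b := e.2.2
  let da := PySem.List.pyGetD cs a PySem.Dict.empty
  let db := PySem.List.pyGetD cs b PySem.Dict.empty
  let new_b := (da.items.filter
      (fun p => p.2 < t && (!(db.contains p.1) || t < db.getD p.1 0))).map (fun p => (p.1, t))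
  let new_a := (db.items.filter
      (fun p => p.2 < t && (!(da.contains p.1) || t < da.getD p.1 0))).map (fun p => (p.1, t))
  let cs1 := PySem.List.pySetD cs b ((PySem.List.pyGetD cs b PySem.Dict.empty).update new_b)
  PySem.List.pySetD cs1 a ((PySem.List.pyGetD cs1 a PySem.Dict.empty).update new_a)

def computeReachA (k : Int) (edge_set : List (Int × Int)) (M : List (List Int)) :
    List (Int × Int) :=
  let n := 2 * k
  let sorted_edges := pvEdgeTriples k edge_set M
  -- can_reach = [dict() for _ in range(n)]; for v in range(n): can_reach[v][v] = 0
  let cr0 : List (PySem.Dict Int Int) := (PySem.List.pyRange 0 n 1).map (fun _ => PySem.Dict.empty)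
  let cr1 := (PySem.List.pyRange 0 n 1).foldl
      (fun cs v => PySem.List.pySetD cs v ((PySem.List.pyGetD cs v PySem.Dict.empty).insert v 0))
      cr0
  let cr2 := sorted_edges.foldl pvStepA cr1
  (PySem.List.pyRange 0 n 1).foldl
    (fun r v => ((PySem.List.pyGetD cr2 v PySem.Dict.empty).keys).foldl
        (fun r src => if src != v then PySem.Set.add r (src, v) else r) r)
    PySem.Set.empty

def fullReachA (k : Int) (M : List (List Int)) : List (Int × Int) :=
  computeReachA k (PySem.Set.ofList (pvAllEdges k)) M

def isSpannerA (k : Int) (M : List (List Int)) (edge_set full_reach : List (Int × Int)) : Bool :=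
  PySem.Set.equal (computeReachA k edge_set M) full_reach

def find_minimum_spanner_greedy (k : Int) (M : List (List Int)) :
    (List (Int × Int)) × (List (Int × Int)) :=
  let full_reach := fullReachA k M
  let all_edges := PySem.List.sorted (pvAllEdges k)
      (fun e => PySem.List.pyGetD (PySem.List.pyGetD M e.1 []) e.2 0) true
  let current := PySem.Set.ofList all_edges
  let final := all_edges.foldl
      (fun cur e =>
        let candidate := PySem.Set.diff cur (PySem.Set.ofList [e])
        if isSpannerA k M candidate full_reach then candidate else cur)
      current
  (final, full_reach)

-- ===== PORT B =====
-- Python's `<=` on 3-tuples, for the library stable sort below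
def pvTripleLe (p q : Int × Int × Int) : Bool :=
  p.1 < q.1 || (p.1 == q.1 && (p.2.1 < q.2.1 || (p.2.1 == q.2.1 && p.2.2 ≤ q.2.2)))

-- events = sorted((M[i][j], i, k + j) for (i, j) in edge_set): Python's sorted (a stable sort by
-- tuple order) ported as the library stable sort List.mergeSort with the tuple order; exact.
def pvEvents (k : Int) (edge_set : List (Int × Int)) (M : List (List Int)) :
    List (Int × Int × Int) :=
  (edge_set.map
    (fun e => (PySem.List.pyGetD (PySem.List.pyGetD M e.1 []) e.2 0, e.1, k + e.2))).mergeSort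
    pvTripleLe

-- old = arrival.get(key); old is None or t < old
def pvNewer (ar : PySem.Dict (Int × Int) Int) (t : Int) (key : Int × Int) : Bool :=
  match ar.get? key with
  | none => true
  | some old => t < old

-- the body of B's edge loop: scan the flat dict twice, collecting an explicit update list
-- (appends, as the Python loop does), then write it back in one pass
def pvStepB (ar : PySem.Dict (Int × Int) Int) (e : Int × Int × Int) :
    PySem.Dict (Int × Int) Int :=
  let t := e.1
  let a := e.2.1
  let b := e.2.2
  let upd1 := ar.items.foldl
    (fun acc p => if p.1.2 == a && p.2 < t && pvNewer ar t (p.1.1, b)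
      then acc ++ [((p.1.1, b), t)] else acc) []
  let upds := ar.items.foldl
    (fun acc p => if p.1.2 == b && p.2 < t && pvNewer ar t (p.1.1, a)
      then acc ++ [((p.1.1, a), t)] else acc) upd1
  ar.update upds

def computeReachB (k : Int) (edge_set : List (Int × Int)) (M : List (List Int)) :
    List (Int × Int) :=
  let n := 2 * k
  let events := pvEvents k edge_set M
  -- arrival = {}; for v in range(n): arrival[(v, v)] = 0
  let ar0 : PySem.Dict (Int × Int) Int :=
    (PySem.List.pyRange 0 n 1).foldl (fun d v => d.insert (v, v) 0) PySem.Dict.empty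
  let ar := events.foldl pvStepB ar0
  (PySem.List.pyRange 0 n 1).foldl
    (fun r v => ar.items.foldl
        (fun r p => if p.1.2 == v && p.1.1 != v then PySem.Set.add r (p.1.1, v) else r) r)
    PySem.Set.empty

-- the while loop popping pending edges from the front, as structural recursion
def pvPrune (k : Int) (M : List (List Int)) (full : List (Int × Int)) :
    List (Int × Int) → List (Int × Int) → List (Int × Int)
  | [], cur => cur
  | e :: rest, cur =>
    let trimmed := PySem.Set.diff cur (PySem.Set.ofList [e])
    if PySem.Set.equal (computeReachB k trimmed M) full
    then pvPrune k M full rest trimmed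
    else pvPrune k M full rest cur

def find_minimum_spanner_greedy_alt (k : Int) (M : List (List Int)) :
    (List (Int × Int)) × (List (Int × Int)) :=
  let all_edges := pvAllEdges k
  let full_reach := computeReachB k (PySem.Set.ofList all_edges) M
  let pending := PySem.List.sorted all_edges
      (fun e => PySem.List.pyGetD (PySem.List.pyGetD M e.1 []) e.2 0) true
  (pvPrune k M full_reach pending (PySem.Set.ofList pending), full_reach)

-- ===== PRECONDITION & SPEC =====
-- Pre_ excludes exactly the inputs where the Python A raises IndexError:
-- k > 0 with fewer than k rows in M, or one of the first k rows shorter than k.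
def Pre_find_minimum_spanner_greedy (k : Int) (M : List (List Int)) : Prop :=
  k.toNat ≤ M.length ∧ ∀ row ∈ M.take k.toNat, k.toNat ≤ row.length
instance (k : Int) (M : List (List Int)) : Decidable (Pre_find_minimum_spanner_greedy k M) := by
  unfold Pre_find_minimum_spanner_greedy; infer_instance

def pvWitness_find_minimum_spanner_greedy : Int × List (List Int) := (2, [[3, 1], [4, 1]])

def Spec_find_minimum_spanner_greedy (k : Int) (M : List (List Int))
    (out : (List (Int × Int)) × (List (Int × Int))) : Prop :=
  out = find_minimum_spanner_greedy_alt k M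
instance (k : Int) (M : List (List Int)) (out : (List (Int × Int)) × (List (Int × Int))) :
    Decidable (Spec_find_minimum_spanner_greedy k M out) := by
  unfold Spec_find_minimum_spanner_greedy; infer_instance

-- ===== CLAIM (what is proved, stated in full; the proofs are below) =====
def Claim_equal_find_minimum_spanner_greedy : Prop :=
  ∀ (k : Int) (M : List (List Int)), Dom_find_minimum_spanner_greedy k M →
    Pre_find_minimum_spanner_greedy k M →
    Spec_find_minimum_spanner_greedy k M (find_minimum_spanner_greedy k M)

-- ===== LEMMAS AND PROOFS =====

-- ---- the two tuple comparators are the strict / non-strict sides of one linear order ----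

theorem pvTripleLt_iff (p q : Int × Int × Int) :
    pvTripleLt p q = true ↔
      p.1 < q.1 ∨ (p.1 = q.1 ∧ (p.2.1 < q.2.1 ∨ (p.2.1 = q.2.1 ∧ p.2.2 < q.2.2))) := by
  simp [pvTripleLt]

theorem pvTripleLe_iff (p q : Int × Int × Int) :
    pvTripleLe p q = true ↔
      p.1 < q.1 ∨ (p.1 = q.1 ∧ (p.2.1 < q.2.1 ∨ (p.2.1 = q.2.1 ∧ p.2.2 ≤ q.2.2))) := by
  simp [pvTripleLe]

theorem pvTripleLt_asymm (p q : Int × Int × Int) (h : pvTripleLt p q = true) :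
    pvTripleLt q p = false := by
  rw [pvTripleLt_iff] at h
  cases hqp : pvTripleLt q p with
  | false => rfl
  | true => exfalso; rw [pvTripleLt_iff] at hqp; omega

theorem pvTripleLt_of_le_of_ne (p q : Int × Int × Int) (hle : pvTripleLe p q = true)
    (hne : p ≠ q) : pvTripleLt p q = true := by
  rw [pvTripleLe_iff] at hle
  rw [pvTripleLt_iff]
  have : ¬ (p.1 = q.1 ∧ p.2.1 = q.2.1 ∧ p.2.2 = q.2.2) := by
    intro ⟨h1, h2, h3⟩
    exact hne (Prod.ext h1 (Prod.ext h2 h3))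
  omega

theorem pvTripleLe_trans (a b c : Int × Int × Int) (h1 : pvTripleLe a b = true)
    (h2 : pvTripleLe b c = true) : pvTripleLe a c = true := by
  rw [pvTripleLe_iff] at *
  omega

theorem pvTripleLe_total (a b : Int × Int × Int) : (pvTripleLe a b || pvTripleLe b a) = true := by
  rw [Bool.or_eq_true, pvTripleLe_iff, pvTripleLe_iff]
  omega

theorem pvTripleLe_of_not_lt (p q : Int × Int × Int) (h : ¬ pvTripleLt q p = true) :
    pvTripleLe p q = true := by
  rw [pvTripleLt_iff] at h
  rw [pvTripleLe_iff]
  omega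

-- ---- A's insertion sort and B's mergeSort agree on duplicate-free triple lists ----

theorem pvInsertBy_perm (x : Int × Int × Int) (ys : List (Int × Int × Int)) :
    (PySem.List.insertBy pvTripleLt x ys).Perm (x :: ys) := by
  induction ys with
  | nil => simp [PySem.List.insertBy]
  | cons y ys ih =>
    rw [PySem.List.insertBy]
    split
    · exact List.Perm.refl _
    · exact ((ih.cons y).trans (List.Perm.swap x y ys))

theorem pvInsertBy_pairwise (x : Int × Int × Int) (ys : List (Int × Int × Int))
    (h : ys.Pairwise (fun p q => ¬ pvTripleLt q p = true)) :
    (PySem.List.insertBy pvTripleLt x ys).Pairwise (fun p q => ¬ pvTripleLt q p = true) := by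
  induction ys with
  | nil => simp [PySem.List.insertBy]
  | cons y ys ih =>
    rw [PySem.List.insertBy]
    rcases List.pairwise_cons.mp h with ⟨hy, hys⟩
    split
    · next hlt =>
      refine List.pairwise_cons.mpr ⟨?_, h⟩
      intro z hz
      rcases List.mem_cons.mp hz with rfl | hz
      · simp [pvTripleLt_asymm _ _ hlt]
      · intro hzx
        have hyz := hy _ hz
        have : pvTripleLt z y = true := by
          have h1 := pvTripleLe_of_not_lt _ _ hyz
          rw [pvTripleLt_iff] at hzx hlt ⊢
          rw [pvTripleLe_iff] at h1
          omega
        exact hyz this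
    · next hnlt =>
      refine List.pairwise_cons.mpr ⟨?_, ih hys⟩
      intro z hz
      rcases List.mem_cons.mp ((pvInsertBy_perm x ys).mem_iff.mp hz) with rfl | hz
      · exact hnlt
      · exact hy _ hz

theorem pvSortTriples_perm (xs : List (Int × Int × Int)) :
    ∀ acc : List (Int × Int × Int),
      (xs.foldl (fun acc x => PySem.List.insertBy pvTripleLt x acc) acc).Perm (acc ++ xs) := by
  induction xs with
  | nil => intro acc; simp
  | cons x xs ih =>
    intro acc
    rw [List.foldl_cons]
    refine (ih _).trans ?_
    refine ((pvInsertBy_perm x acc).append_right xs).trans ?_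
    simpa using (List.perm_middle (a := x) (l₁ := acc) (l₂ := xs)).symm

theorem pvSortTriples_pairwise (xs : List (Int × Int × Int)) :
    ∀ acc : List (Int × Int × Int), acc.Pairwise (fun p q => ¬ pvTripleLt q p = true) →
      (xs.foldl (fun acc x => PySem.List.insertBy pvTripleLt x acc) acc).Pairwise
        (fun p q => ¬ pvTripleLt q p = true) := by
  induction xs with
  | nil => intro acc h; exact h
  | cons x xs ih =>
    intro acc h
    exact ih _ (pvInsertBy_pairwise x acc h)

theorem pvStrictSorted_unique (l1 l2 : List (Int × Int × Int)) (hp : l1.Perm l2)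
    (h1 : l1.Pairwise (fun p q => pvTripleLt p q = true))
    (h2 : l2.Pairwise (fun p q => pvTripleLt p q = true)) : l1 = l2 := by
  refine List.Perm.eq_of_pairwise ?_ h1 h2 hp
  intro a b _ _ hab hba
  exact absurd hba (by simp [pvTripleLt_asymm _ _ hab])

theorem pvPairwise_lt_of_le (l : List (Int × Int × Int)) (hnd : l.Nodup)
    (h : l.Pairwise (fun p q => pvTripleLe p q = true)) :
    l.Pairwise (fun p q => pvTripleLt p q = true) := by
  have := h.and hnd
  exact this.imp (fun {a b} hab => pvTripleLt_of_le_of_ne a b hab.1 hab.2)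

theorem pvEvents_eq (k : Int) (es : List (Int × Int)) (M : List (List Int))
    (hnd : es.Nodup) : pvEvents k es M = pvEdgeTriples k es M := by
  set l := es.map
    (fun e => (PySem.List.pyGetD (PySem.List.pyGetD M e.1 []) e.2 0, e.1, k + e.2)) with hl
  have hlnd : l.Nodup := by
    refine hnd.map ?_
    intro a b hab
    have h2 : a.1 = b.1 := congrArg (fun p => p.2.1) hab
    have h3 : k + a.2 = k + b.2 := congrArg (fun p => p.2.2) hab
    exact Prod.ext h2 (by omega)
  apply pvStrictSorted_unique
  · exact (List.mergeSort_perm l pvTripleLe).trans (pvSortTriples_perm l []).symm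
  · exact pvPairwise_lt_of_le _ ((List.mergeSort_perm l pvTripleLe).nodup_iff.mpr hlnd)
      (List.pairwise_mergeSort pvTripleLe_trans pvTripleLe_total l)
  · refine pvPairwise_lt_of_le _ ((pvSortTriples_perm l []).nodup_iff.mpr (by simpa using hlnd)) ?_
    exact (pvSortTriples_pairwise l [] (by simp)).imp
      (fun {a b} hab => pvTripleLe_of_not_lt a b hab)

-- ---- the flat (source, vertex) dict of B projects onto A's per-vertex dicts ----

def pvProj (v : Int) (d : PySem.Dict (Int × Int) Int) : PySem.Dict Int Int :=
  PySem.Dict.mk ((d.items.filter (fun p => p.1.2 == v)).map (fun p => (p.1.1, p.2)))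

-- edges all inside [0,k) x [0,k)
def pvBounded (k : Int) (es : List (Int × Int)) : Prop :=
  ∀ e ∈ es, 0 ≤ e.1 ∧ e.1 < k ∧ 0 ≤ e.2 ∧ e.2 < k

theorem pvProj_get? (v : Int) (d : PySem.Dict (Int × Int) Int) (s : Int) :
    (pvProj v d).get? s = d.get? (s, v) := by
  obtain ⟨l⟩ := d
  induction l with
  | nil => rfl
  | cons p l ih =>
    obtain ⟨⟨s', u'⟩, t'⟩ := p
    by_cases hu : u' = v
    · subst hu
      by_cases hs : s' = s
      · subst hs
        simp [pvProj, PySem.Dict.get?]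
      · simpa [pvProj, PySem.Dict.get?, hs] using ih
    · simpa [pvProj, PySem.Dict.get?, hu, Ne.symm] using ih

theorem pvProj_contains (v : Int) (d : PySem.Dict (Int × Int) Int) (s : Int) :
    (pvProj v d).contains s = d.contains (s, v) := by
  rw [PySem.Dict.contains_eq_isSome_get?, PySem.Dict.contains_eq_isSome_get?, pvProj_get?]

theorem pvProj_getD (v : Int) (d : PySem.Dict (Int × Int) Int) (s d0 : Int) :
    (pvProj v d).getD s d0 = d.getD (s, v) d0 := by
  simp [PySem.Dict.getD, pvProj_get?]

theorem pvProj_insert (v w s t : Int) (d : PySem.Dict (Int × Int) Int) :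
    pvProj v (d.insert (s, w) t) = if v = w then (pvProj v d).insert s t else pvProj v d := by
  obtain ⟨l⟩ := d
  by_cases hc : (PySem.Dict.mk l).contains (s, w) = true
  · have hc' : (pvProj w (PySem.Dict.mk l)).contains s = true := by rw [pvProj_contains]; exact hc
    have hrep : ∀ p : (Int × Int) × Int,
        ((if (p.1 == (s, w)) = true then ((s, w), t) else p)).1.2 = p.1.2 := by
      intro p; split
      · next h => rw [show p.1 = (s, w) from by simpa using h]
      · rfl
    by_cases hv : v = w
    · subst hv
      simp only [PySem.Dict.insert, hc, if_true]
      rw [if_pos hc']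
      simp only [pvProj, List.filter_map]
      congr 1
      rw [List.filter_congr (by intro p hp; simp only [Function.comp]; rw [hrep p]),
        List.map_map, List.map_map]
      apply List.map_congr_left
      intro p hp
      have hpv : p.1.2 = v := by simpa using (List.mem_filter.mp hp).2
      simp only [Function.comp]
      by_cases hps : p.1.1 = s
      · have : p.1 = (s, v) := by ext <;> simp [hps, hpv]
        simp [this]
      · have : ¬ p.1 = (s, v) := by intro h; exact hps (by rw [h])
        simp [hps, this]
    · simp only [PySem.Dict.insert, hc, if_true, if_neg hv, pvProj, List.filter_map]
      congr 1
      rw [List.filter_congr (by intro p hp; simp only [Function.comp]; rw [hrep p]),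
        List.map_map]
      apply List.map_congr_left
      intro p hp
      have hpv : p.1.2 = v := by simpa using (List.mem_filter.mp hp).2
      have hne : ¬ (p.1 == (s, w)) = true := by
        simp only [beq_iff_eq]; intro h; exact hv (by rw [← hpv, h])
      simp [Function.comp, hne]
  · have hc' : ¬ ((pvProj w (PySem.Dict.mk l)).contains s = true) := by
      rw [pvProj_contains]; exact hc
    by_cases hv : v = w
    · subst hv
      simp only [PySem.Dict.insert]
      rw [if_neg hc, if_pos trivial, if_neg hc']
      apply PySem.Dict.ext
      simp [pvProj, List.filter_append]
    · simp only [PySem.Dict.insert]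
      rw [if_neg hc, if_neg hv]
      apply PySem.Dict.ext
      have hwv : (w == v) = false := by simp; exact fun h => hv h.symm
      simp [pvProj, List.filter_append, hwv]

theorem pvProj_update (v w : Int) (d : PySem.Dict (Int × Int) Int) (ps : List (Int × Int)) :
    pvProj v (d.update (ps.map (fun q => ((q.1, w), q.2)))) =
      if v = w then (pvProj v d).update ps else pvProj v d := by
  simp only [PySem.Dict.update]
  induction ps generalizing d with
  | nil => by_cases hv : v = w <;> simp [hv]
  | cons q ps ih =>
    simp only [List.map_cons, List.foldl_cons]
    rw [ih]
    by_cases hv : v = w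
    · simp [hv, pvProj_insert]
    · simp [hv, pvProj_insert]

theorem pvSet_map_range (n m : Int) (f : Int → PySem.Dict Int Int) (x : PySem.Dict Int Int)
    (h0 : 0 ≤ m) (_hm : m < n) :
    PySem.List.pySetD ((PySem.List.pyRange 0 n 1).map f) m x
      = (PySem.List.pyRange 0 n 1).map (fun v => if v = m then x else f v) := by
  rw [PySem.List.pySetD_of_nonneg _ _ h0]
  apply List.ext_getElem
  · simp
  · intro i h1 h2
    simp only [List.getElem_set, List.getElem_map, PySem.List.getElem_pyRange_one]
    have hlen : i < (n - 0).toNat := by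
      simpa [PySem.List.length_pyRange_one] using (by simpa using h2)
    by_cases hi : m.toNat = i
    · rw [if_pos hi, if_pos (by omega)]
    · rw [if_neg hi, if_neg (by omega)]

theorem pvInitA (n : Int) (c : Nat) : ∀ (m : Int), 0 ≤ m → (n - m).toNat = c →
    ∀ f : Int → PySem.Dict Int Int,
    (PySem.List.pyRange m n 1).foldl
        (fun cs v =>
          PySem.List.pySetD cs v ((PySem.List.pyGetD cs v PySem.Dict.empty).insert v 0))
        ((PySem.List.pyRange 0 n 1).map f)
      = (PySem.List.pyRange 0 n 1).map (fun v => if m ≤ v then (f v).insert v 0 else f v) := by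
  induction c with
  | zero =>
    intro m h0 hc f
    rw [PySem.List.pyRange_one_eq_nil (a := m) (b := n) (by omega)]
    simp only [List.foldl_nil]
    apply List.map_congr_left
    intro v hv
    have := (PySem.List.mem_pyRange_one.mp hv)
    rw [if_neg (by omega)]
  | succ c ih =>
    intro m h0 hc f
    rw [PySem.List.pyRange_one_cons (a := m) (b := n) (by omega)]
    simp only [List.foldl_cons]
    rw [PySem.List.pyGetD_map_pyRange_of_nonneg _ _ _ _ h0 (by omega),
      pvSet_map_range n m f _ h0 (by omega)]
    rw [ih (m + 1) (by omega) (by omega)]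
    apply List.map_congr_left
    intro v hv
    have := (PySem.List.mem_pyRange_one.mp hv)
    by_cases hvm : v = m
    · subst hvm
      rw [if_neg (by omega : ¬ v + 1 ≤ v), if_pos rfl, if_pos (le_refl v)]
    · by_cases hmv : m ≤ v
      · rw [if_pos (by omega), if_neg hvm, if_pos hmv]
      · rw [if_neg (by omega), if_neg hvm, if_neg hmv]

def pvInv (n : Int) (cs : List (PySem.Dict Int Int)) (ar : PySem.Dict (Int × Int) Int) : Prop :=
  cs.length = n.toNat ∧
  ∀ v : Int, 0 ≤ v → v < n →
    PySem.List.pyGetD cs v PySem.Dict.empty = pvProj v ar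

theorem pvAr0_items (n : Int) :
    ((PySem.List.pyRange 0 n 1).foldl (fun d v => d.insert (v, v) 0)
        (PySem.Dict.empty : PySem.Dict (Int × Int) Int)).items
      = (PySem.List.pyRange 0 n 1).map (fun v => ((v, v), (0 : Int))) := by
  rw [PySem.Dict.items_foldl_insert_fresh (PySem.List.pyRange 0 n 1)
      (fun a => (a, a)) (fun _ => (0 : Int)) PySem.Dict.empty
      (fun a _ => by simp [PySem.Dict.contains_empty])
      ((PySem.List.nodup_pyRange_one 0 n).map (fun a b h => by injection h))]
  simp [PySem.Dict.empty]

theorem pvInit_inv (n : Int) :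
    pvInv n
      ((PySem.List.pyRange 0 n 1).foldl
        (fun cs v =>
          PySem.List.pySetD cs v ((PySem.List.pyGetD cs v PySem.Dict.empty).insert v 0))
        ((PySem.List.pyRange 0 n 1).map (fun _ => PySem.Dict.empty)))
      ((PySem.List.pyRange 0 n 1).foldl (fun d v => d.insert (v, v) 0) PySem.Dict.empty) := by
  rw [pvInitA n (n - 0).toNat 0 (by omega) rfl (fun _ => PySem.Dict.empty)]
  constructor
  · simp [PySem.List.length_pyRange_one]
  · intro v h0 hn
    rw [PySem.List.pyGetD_map_pyRange_of_nonneg _ _ _ _ h0 hn, if_pos h0]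
    apply PySem.Dict.ext
    simp only [pvProj, pvAr0_items, List.filter_map]
    have hfil : (PySem.List.pyRange 0 n 1).filter
        ((fun (p : (Int × Int) × Int) => p.1.2 == v) ∘ fun w => ((w, w), (0:Int))) = [v] := by
      show (PySem.List.pyRange 0 n 1).filter (fun w => w == v) = [v]
      rw [List.filter_beq v,
        List.count_eq_one_of_mem (PySem.List.nodup_pyRange_one 0 n)
          (PySem.List.mem_pyRange_one.mpr ⟨h0, hn⟩)]
      rfl
    rw [hfil]
    simp [PySem.Dict.insert, PySem.Dict.empty, PySem.Dict.contains]

theorem pvGetD_setD {α : Type} (xs : List α) (i j : Int) (v d : α)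
    (h0 : 0 ≤ i) (hl : i < (xs.length : Int)) (h0' : 0 ≤ j) :
    PySem.List.pyGetD (PySem.List.pySetD xs i v) j d
      = if j = i then v else PySem.List.pyGetD xs j d := by
  rw [show i = ((i.toNat : Nat) : Int) by omega, show j = ((j.toNat : Nat) : Int) by omega,
    PySem.List.pyGetD_pySetD_natCast xs i.toNat j.toNat v d (by omega)]
  by_cases h : j.toNat = i.toNat
  · rw [if_pos h, if_pos (by omega)]
  · rw [if_neg h, if_neg (by omega)]

theorem pvNewer_eq (ar : PySem.Dict (Int × Int) Int) (t : Int) (key : Int × Int) :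
    pvNewer ar t key = (!(ar.contains key) || decide (t < ar.getD key 0)) := by
  unfold pvNewer
  cases h : ar.get? key <;>
    simp [PySem.Dict.contains_eq_isSome_get?, PySem.Dict.getD, h]

theorem pvFilter_lift (ar : PySem.Dict (Int × Int) Int) (x y t : Int) :
    (ar.items.filter (fun p => p.1.2 == x && p.2 < t && pvNewer ar t (p.1.1, y))).map
      (fun p => ((p.1.1, y), t))
    = (((pvProj x ar).items.filter (fun q => q.2 < t &&
        (!((pvProj y ar).contains q.1) || t < (pvProj y ar).getD q.1 0))).map
        (fun q => (q.1, t))).map (fun q => ((q.1, y), q.2)) := by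
  have aux : ∀ (l : List ((Int × Int) × Int)) (P : Int → Int → Bool),
      (l.filter (fun p => p.1.2 == x && P p.1.1 p.2)).map (fun p => ((p.1.1, y), t))
      = ((((l.filter (fun p => p.1.2 == x)).map (fun p => (p.1.1, p.2))).filter
          (fun q => P q.1 q.2)).map (fun q => (q.1, t))).map (fun q => ((q.1, y), q.2)) := by
    intro l P
    induction l with
    | nil => rfl
    | cons p l ih =>
      by_cases h1 : p.1.2 = x
      · by_cases h2 : P p.1.1 p.2 = true
        · simp only [List.filter_cons, h1, h2]
          simp [h2, ih]
        · simp only [List.filter_cons, h1, h2]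
          simp [h2, ih]
      · simp [h1, ih]
  have hpred : (ar.items.filter (fun p => p.1.2 == x && p.2 < t && pvNewer ar t (p.1.1, y)))
      = ar.items.filter (fun p => p.1.2 == x &&
          (decide (p.2 < t) && (!(ar.contains (p.1.1, y)) || decide (t < ar.getD (p.1.1, y) 0)))) := by
    apply List.filter_congr
    intro p _
    rw [pvNewer_eq]
    simp [Bool.and_assoc]
  rw [hpred]
  simp only [pvProj_contains, pvProj_getD]
  exact aux ar.items
    (fun s at_ => decide (at_ < t) && (!(ar.contains (s, y)) || decide (t < ar.getD (s, y) 0)))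

-- B's two foldl scans build exactly the fwd/bwd batches, and one update is the two in sequence
theorem pvStepB_eq (ar : PySem.Dict (Int × Int) Int) (t a b : Int) :
    pvStepB ar (t, a, b)
      = (ar.update ((ar.items.filter
            (fun p => p.1.2 == a && p.2 < t && pvNewer ar t (p.1.1, b))).map
            (fun p => ((p.1.1, b), t)))).update
          ((ar.items.filter
            (fun p => p.1.2 == b && p.2 < t && pvNewer ar t (p.1.1, a))).map
            (fun p => ((p.1.1, a), t))) := by
  have h1 : pvStepB ar (t, a, b)
      = ar.update (ar.items.foldl
          (fun acc p => if p.1.2 == b && p.2 < t && pvNewer ar t (p.1.1, a)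
            then acc ++ [((p.1.1, a), t)] else acc)
          (ar.items.foldl
            (fun acc p => if p.1.2 == a && p.2 < t && pvNewer ar t (p.1.1, b)
              then acc ++ [((p.1.1, b), t)] else acc) [])) := rfl
  rw [h1, PySem.List.foldl_append_if (fun p => p.1.2 == a && p.2 < t && pvNewer ar t (p.1.1, b))
      (fun p => ((p.1.1, b), t)) ar.items []]
  rw [PySem.List.foldl_append_if (fun p => p.1.2 == b && p.2 < t && pvNewer ar t (p.1.1, a))
      (fun p => ((p.1.1, a), t)) ar.items]
  simp [PySem.Dict.update, List.foldl_append]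

theorem pvStep_preserve (n t a b : Int) (ha : 0 ≤ a) (ha2 : a < n)
    (hb : 0 ≤ b) (hb2 : b < n) (hab : a ≠ b)
    (cs : List (PySem.Dict Int Int)) (ar : PySem.Dict (Int × Int) Int)
    (hinv : pvInv n cs ar) : pvInv n (pvStepA cs (t, a, b)) (pvStepB ar (t, a, b)) := by
  obtain ⟨hlen, hvv⟩ := hinv
  have hlen' : (cs.length : Int) = n.toNat := by exact_mod_cast hlen
  have hbl : b < (cs.length : Int) := by omega
  have hal : a < (cs.length : Int) := by omega
  have hda : PySem.List.pyGetD cs a PySem.Dict.empty = pvProj a ar := hvv a ha ha2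
  have hdb : PySem.List.pyGetD cs b PySem.Dict.empty = pvProj b ar := hvv b hb hb2
  rw [pvStepB_eq]
  simp only [pvStepA]
  rw [hda, hdb, pvFilter_lift ar a b t, pvFilter_lift ar b a t]
  set nb := ((pvProj a ar).items.filter (fun q => q.2 < t &&
      (!((pvProj b ar).contains q.1) || t < (pvProj b ar).getD q.1 0))).map
      (fun q => (q.1, t)) with hnb
  set na := ((pvProj b ar).items.filter (fun q => q.2 < t &&
      (!((pvProj a ar).contains q.1) || t < (pvProj a ar).getD q.1 0))).map
      (fun q => (q.1, t)) with hna
  rw [pvGetD_setD cs b a _ _ hb hbl ha, if_neg hab, hda]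
  constructor
  · simp [PySem.List.length_pySetD, hlen]
  · intro v h0 hn
    rw [pvGetD_setD _ a v _ _ ha (by rw [PySem.List.length_pySetD]; exact hal) h0,
      pvGetD_setD cs b v _ _ hb hbl h0,
      pvProj_update v a ((ar.update (nb.map fun q => ((q.1, b), q.2)))) na,
      pvProj_update v b ar nb]
    by_cases hva : v = a
    · rw [if_pos hva, if_pos hva, if_neg (by omega : ¬ v = b), hva]
    · rw [if_neg hva, if_neg hva]
      by_cases hvb : v = b
      · rw [if_pos hvb, if_pos hvb, hvb]
      · rw [if_neg hvb, if_neg hvb]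
        exact hvv v h0 hn

theorem pvMem_foldl_insertBy (xs : List (Int × Int × Int)) :
    ∀ (acc : List (Int × Int × Int)) (x : Int × Int × Int),
      x ∈ xs.foldl (fun acc x => PySem.List.insertBy pvTripleLt x acc) acc →
      x ∈ acc ∨ x ∈ xs := by
  induction xs with
  | nil => intro acc x hx; exact Or.inl hx
  | cons y ys ih =>
    intro acc x hx
    rcases ih _ x hx with h | h
    · rcases (PySem.List.mem_insertBy pvTripleLt y x acc).mp h with h' | h'
      · exact Or.inr (by simp [h'])
      · exact Or.inl h'
    · exact Or.inr (List.mem_cons_of_mem _ h)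

theorem pvFold_inv (n : Int) (es' : List (Int × Int × Int))
    (h : ∀ e ∈ es', 0 ≤ e.2.1 ∧ e.2.1 < n ∧ 0 ≤ e.2.2 ∧ e.2.2 < n ∧ e.2.1 ≠ e.2.2)
    (cs : List (PySem.Dict Int Int)) (ar : PySem.Dict (Int × Int) Int)
    (hinv : pvInv n cs ar) : pvInv n (es'.foldl pvStepA cs) (es'.foldl pvStepB ar) := by
  induction es' generalizing cs ar with
  | nil => exact hinv
  | cons e es ih =>
    obtain ⟨t, a, b⟩ := e
    obtain ⟨h1, h2, h3, h4, h5⟩ := h (t, a, b) List.mem_cons_self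
    exact ih (fun e he => h e (List.mem_cons_of_mem _ he)) _ _
      (pvStep_preserve n t a b h1 h2 h3 h4 h5 cs ar hinv)

theorem pvFoldl_filter_if {α : Type} (l : List α) (c d : α → Bool)
    (g : PySem.Set (Int × Int) → α → PySem.Set (Int × Int)) :
    ∀ r, l.foldl (fun r p => if c p && d p then g r p else r) r
      = (l.filter c).foldl (fun r p => if d p then g r p else r) r := by
  induction l with
  | nil => intro r; rfl
  | cons p l ih =>
    intro r
    rw [List.foldl_cons, List.filter_cons]
    by_cases h1 : c p = true
    · rw [if_pos h1, List.foldl_cons]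
      by_cases h2 : d p = true
      · rw [if_pos h2, if_pos (by rw [h1, h2]; rfl)]
        exact ih _
      · rw [if_neg h2, if_neg (by rw [show d p = false by simpa using h2]; simp)]
        exact ih _
    · rw [if_neg h1, if_neg (by rw [show c p = false by simpa using h1]; simp)]
      exact ih _

theorem pvFinal_eq (n : Int) (cs : List (PySem.Dict Int Int)) (ar : PySem.Dict (Int × Int) Int)
    (hinv : pvInv n cs ar) :
    (PySem.List.pyRange 0 n 1).foldl
      (fun r v => ((PySem.List.pyGetD cs v PySem.Dict.empty).keys).foldl
          (fun r src => if src != v then PySem.Set.add r (src, v) else r) r)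
      PySem.Set.empty
    = (PySem.List.pyRange 0 n 1).foldl
      (fun r v => ar.items.foldl
          (fun r p => if p.1.2 == v && p.1.1 != v then PySem.Set.add r (p.1.1, v) else r) r)
      PySem.Set.empty := by
  apply PySem.List.foldl_congr_mem
  intro r v hv
  obtain ⟨h0, hn⟩ := PySem.List.mem_pyRange_one.mp hv
  rw [hinv.2 v h0 hn]
  show ((((ar.items.filter (fun p => p.1.2 == v)).map (fun p => (p.1.1, p.2))).map
      (fun q : Int × Int => q.1)).foldl (fun r src => if src != v then PySem.Set.add r (src, v) else r) r) = _
  rw [List.foldl_map, List.foldl_map,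
    pvFoldl_filter_if ar.items (fun p => p.1.2 == v) (fun p => p.1.1 != v)
      (fun r p => PySem.Set.add r (p.1.1, v)) r]

theorem pvBounded_allEdges (k : Int) : pvBounded k (pvAllEdges k) := by
  intro e he
  simp only [pvAllEdges, List.mem_flatMap, List.mem_map] at he
  obtain ⟨i, hi, j, hj, rfl⟩ := he
  obtain ⟨hi0, hik⟩ := PySem.List.mem_pyRange_one.mp hi
  obtain ⟨hj0, hjk⟩ := PySem.List.mem_pyRange_one.mp hj
  exact ⟨hi0, hik, hj0, hjk⟩

theorem pvBounded_all (k : Int) : pvBounded k (PySem.Set.ofList (pvAllEdges k)) := by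
  intro e he
  exact pvBounded_allEdges k e ((PySem.Set.mem_ofList _ _).mp he)

theorem pvBounded_diff (k : Int) (s t : List (Int × Int)) (h : pvBounded k s) :
    pvBounded k (PySem.Set.diff s t) := by
  intro e he
  exact h e (List.mem_filter.mp he).1

theorem pvCompute_eq (k : Int) (es : List (Int × Int)) (M : List (List Int))
    (hb : pvBounded k es) (hnd : es.Nodup) : computeReachA k es M = computeReachB k es M := by
  have hedges : ∀ e ∈ pvEdgeTriples k es M,
      0 ≤ e.2.1 ∧ e.2.1 < 2 * k ∧ 0 ≤ e.2.2 ∧ e.2.2 < 2 * k ∧ e.2.1 ≠ e.2.2 := by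
    intro e he
    have : e ∈ es.map
        (fun e => (PySem.List.pyGetD (PySem.List.pyGetD M e.1 []) e.2 0, e.1, k + e.2)) := by
      rcases pvMem_foldl_insertBy _ [] e he with h | h
      · exact absurd h (List.not_mem_nil)
      · exact h
    obtain ⟨e0, he0, rfl⟩ := List.mem_map.mp this
    obtain ⟨h1, h2, h3, h4⟩ := hb e0 he0
    dsimp only
    exact ⟨h1, by omega, by omega, by omega, by omega⟩
  show
    (PySem.List.pyRange 0 (2 * k) 1).foldl _ PySem.Set.empty
    = (PySem.List.pyRange 0 (2 * k) 1).foldl _ PySem.Set.empty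
  rw [show pvEvents k es M = pvEdgeTriples k es M from pvEvents_eq k es M hnd]
  exact pvFinal_eq (2 * k) _ _
    (pvFold_inv (2 * k) (pvEdgeTriples k es M) hedges _ _ (pvInit_inv (2 * k)))

theorem pvPrune_eq (k : Int) (M : List (List Int)) (fr : List (Int × Int))
    (l : List (Int × Int)) : ∀ (cur : List (Int × Int)), pvBounded k cur → cur.Nodup →
    pvPrune k M fr l cur
    = l.foldl (fun cur e =>
        let candidate := PySem.Set.diff cur (PySem.Set.ofList [e])
        if isSpannerA k M candidate fr then candidate else cur) cur := by
  induction l with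
  | nil => intro cur _ _; rfl
  | cons e l ih =>
    intro cur hcur hnd
    simp only [pvPrune, List.foldl_cons]
    have hc : pvBounded k (PySem.Set.diff cur (PySem.Set.ofList [e])) :=
      pvBounded_diff k cur _ hcur
    have hcnd : (PySem.Set.diff cur (PySem.Set.ofList [e])).Nodup :=
      PySem.Set.nodup_diff _ _ hnd
    rw [show isSpannerA k M (PySem.Set.diff cur (PySem.Set.ofList [e])) fr
          = PySem.Set.equal (computeReachB k (PySem.Set.diff cur (PySem.Set.ofList [e])) M) fr
        from by rw [isSpannerA, pvCompute_eq k _ M hc hcnd]]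
    by_cases hsp :
        PySem.Set.equal (computeReachB k (PySem.Set.diff cur (PySem.Set.ofList [e])) M) fr = true
    · rw [if_pos hsp, if_pos hsp]
      exact ih _ hc hcnd
    · rw [if_neg hsp, if_neg hsp]
      exact ih _ hcur hnd

-- ===== VERDICT (by name: the statement is the Claim_ definition above) =====
theorem find_minimum_spanner_greedy_spec : Claim_equal_find_minimum_spanner_greedy := by
  intro k M _ _
  unfold Spec_find_minimum_spanner_greedy
  unfold find_minimum_spanner_greedy find_minimum_spanner_greedy_alt
  have hfr : fullReachA k M = computeReachB k (PySem.Set.ofList (pvAllEdges k)) M :=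
    pvCompute_eq k _ M (pvBounded_all k) (PySem.Set.nodup_ofList _)
  have hinit : pvBounded k (PySem.Set.ofList (PySem.List.sorted (pvAllEdges k)
      (fun e => PySem.List.pyGetD (PySem.List.pyGetD M e.1 []) e.2 0) true)) := by
    intro e he
    exact pvBounded_allEdges k e
      ((PySem.List.mem_sorted _ _ _ _).mp ((PySem.Set.mem_ofList _ _).mp he))
  dsimp only
  rw [hfr, pvPrune_eq k M _ _ _ hinit (PySem.Set.nodup_ofList _)]
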